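-- pv_equiv track=rewrite | github.com/Innopolis-bs23/24-fall-optimization | prog3/russell.py | find_russell_costs
-- ===== SOURCE A (Python) =====
-- INF = 10**3
--
-- def find_russell_costs(supply, demand, costs):
--     u = [0] * len(supply)  # largest cost in each row
--     v = [0] * len(demand)  # largest cost in each column
--
--     # calculate the largest costs for each row and column
--     for i in range(len(supply)):
--         valid_costs = [cost for cost in costs[i] if cost != INF]
--         if valid_costs:
--             u[i] = max(valid_costs)
--
--     for j in range(len(demand)):
--         valid_costs = [costs[i][j] for i in range(len(supply)) if costs[i][j] != INF]
--         if valid_costs: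
--             v[j] = max(valid_costs)
--
--     return u, v
-- ===== SOURCE B (Python) =====
-- INF = 10**3
--
-- def find_russell_costs(supply, demand, costs):
--     # One fused traversal: read each matrix entry once, maintaining both
--     # running row maxima (u) and column maxima (v); None marks "no valid
--     # cost seen yet" and becomes 0 at the end.
--     u = [None] * len(supply)
--     v = [None] * len(demand)
--     for i in range(len(supply)):
--         for j, c in enumerate(costs[i]):
--             if c != INF:
--                 if u[i] is None or c > u[i]:
--                     u[i] = c
--                 if j < len(demand) and (v[j] is None or c > v[j]):
--                     v[j] = c
--     return [x if x is not None else 0 for x in u], [x if x is not None else 0 for x in v]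
-- ===== Notes on version B (the rewrite author's own statement) =====
-- stated objective: alternative
-- what changed: Replaces A's two separate passes (a per-row max pass, then a per-column pass that re-scans the matrix column by column) with one fused traversal that reads every matrix entry exactly once, maintaining running row and column maxima in Option-seeded accumulators that are defaulted to 0 at the end.
import Mathlib
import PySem

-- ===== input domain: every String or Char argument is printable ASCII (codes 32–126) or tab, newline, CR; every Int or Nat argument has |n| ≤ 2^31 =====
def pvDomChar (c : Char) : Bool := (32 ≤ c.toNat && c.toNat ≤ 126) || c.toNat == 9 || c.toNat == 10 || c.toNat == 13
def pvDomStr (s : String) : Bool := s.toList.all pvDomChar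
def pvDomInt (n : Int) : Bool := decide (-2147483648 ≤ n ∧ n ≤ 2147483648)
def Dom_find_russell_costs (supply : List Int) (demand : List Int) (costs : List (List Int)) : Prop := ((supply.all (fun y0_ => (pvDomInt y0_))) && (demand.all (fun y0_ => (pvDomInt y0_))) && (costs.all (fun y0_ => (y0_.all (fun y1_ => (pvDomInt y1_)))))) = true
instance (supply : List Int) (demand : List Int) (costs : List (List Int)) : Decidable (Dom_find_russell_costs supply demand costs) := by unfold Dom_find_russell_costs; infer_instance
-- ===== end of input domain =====

-- B fuses A's two passes (row-max pass, then a column-by-column re-scan) into one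
-- traversal of the matrix that maintains both running maxima at once (objective: alternative).

-- ===== PORT A =====
def find_russell_costs (supply : List Int) (demand : List Int) (costs : List (List Int)) : List Int × List Int :=
  let u0 : List Int := List.replicate supply.length 0
  let v0 : List Int := List.replicate demand.length 0
  let u := (PySem.List.pyRange 0 (supply.length : Int) 1).foldl (fun u i =>
    let valid := (PySem.List.pyGetD costs i []).filter (fun c => c ≠ 1000)
    match PySem.List.max? valid (fun y => y) with
    | some m => u.set i.toNat m
    | none => u) u0
  let v := (PySem.List.pyRange 0 (demand.length : Int) 1).foldl (fun v j =>
    let valid := ((PySem.List.pyRange 0 (supply.length : Int) 1).map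
        (fun i => PySem.List.pyGetD (PySem.List.pyGetD costs i []) j 0)).filter (fun c => c ≠ 1000)
    match PySem.List.max? valid (fun y => y) with
    | some m => v.set j.toNat m
    | none => v) v0
  (u, v)

-- ===== PORT B =====
def find_russell_costs_alt (supply : List Int) (demand : List Int) (costs : List (List Int)) : List Int × List Int :=
  let init : List (Option Int) × List (Option Int) :=
    (List.replicate supply.length none, List.replicate demand.length none)
  let st := (PySem.List.pyRange 0 (supply.length : Int) 1).foldl (fun st i =>
    (PySem.List.enumerate (PySem.List.pyGetD costs i []) 0).foldl (fun st jc =>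
      if jc.2 ≠ 1000 then
        let u' := match st.1.getD i.toNat none with
          | none => st.1.set i.toNat (some jc.2)
          | some x => if jc.2 > x then st.1.set i.toNat (some jc.2) else st.1
        let v' := if jc.1 < (demand.length : Int) then
            match st.2.getD jc.1.toNat none with
            | none => st.2.set jc.1.toNat (some jc.2)
            | some x => if jc.2 > x then st.2.set jc.1.toNat (some jc.2) else st.2
          else st.2
        (u', v')
      else st) st) init
  (st.1.map (fun o => o.getD 0), st.2.map (fun o => o.getD 0))

-- ===== PRECONDITION & SPEC =====
-- Pre_ excludes exactly the inputs where Python A raises an IndexError: fewer rows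
-- than len(supply), or one of the first len(supply) rows shorter than len(demand).
def Pre_find_russell_costs (supply : List Int) (demand : List Int) (costs : List (List Int)) : Prop :=
  supply.length ≤ costs.length ∧ ∀ row ∈ costs.take supply.length, demand.length ≤ row.length
instance (supply : List Int) (demand : List Int) (costs : List (List Int)) : Decidable (Pre_find_russell_costs supply demand costs) := by unfold Pre_find_russell_costs; infer_instance
def pvWitness_find_russell_costs : List Int × List Int × List (List Int) := ([1, 2], [3], [[4], [1000, 5]])

def Spec_find_russell_costs (supply : List Int) (demand : List Int) (costs : List (List Int)) (out : List Int × List Int) : Prop := out = find_russell_costs_alt supply demand costs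
instance (supply : List Int) (demand : List Int) (costs : List (List Int)) (out : List Int × List Int) : Decidable (Spec_find_russell_costs supply demand costs out) := by unfold Spec_find_russell_costs; infer_instance

-- ===== CLAIM (what is proved, stated in full; the proofs are below) =====
def Claim_equal_find_russell_costs : Prop := ∀ (supply : List Int) (demand : List Int) (costs : List (List Int)), Dom_find_russell_costs supply demand costs → Pre_find_russell_costs supply demand costs → Spec_find_russell_costs supply demand costs (find_russell_costs supply demand costs)

-- ===== LEMMAS AND PROOFS =====

-- Running "first-maximum" step used by both proofs (B's fused update on one Option cell).
def pvMStep (o : Option Int) (c : Int) : Option Int :=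
  if c ≠ 1000 then
    match o with
    | none => some c
    | some x => if c > x then some c else some x
  else o

-- the pure running-max step (no INF filtering)
def pvMRun (o : Option Int) (c : Int) : Option Int :=
  match o with
  | none => some c
  | some x => if c > x then some c else some x

-- B's per-element update on the row accumulator, at fixed row index i
def pvFU (i : Nat) (u : List (Option Int)) (jc : Int × Int) : List (Option Int) :=
  if jc.2 ≠ 1000 then
    match u.getD i none with
    | none => u.set i (some jc.2)
    | some x => if jc.2 > x then u.set i (some jc.2) else u
  else u

-- B's per-element update on the column accumulator
def pvFV (dlen : Nat) (v : List (Option Int)) (jc : Int × Int) : List (Option Int) :=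
  if jc.2 ≠ 1000 then
    (if jc.1 < (dlen : Int) then
      match v.getD jc.1.toNat none with
      | none => v.set jc.1.toNat (some jc.2)
      | some x => if jc.2 > x then v.set jc.1.toNat (some jc.2) else v
    else v)
  else v

theorem pvMRun_foldl_some (t : List Int) (x : Int) :
    t.foldl pvMRun (some x) = some (t.foldl max x) := by
  induction t generalizing x with
  | nil => rfl
  | cons c t ih =>
      simp only [List.foldl_cons, pvMRun]
      by_cases h : c > x
      · rw [if_pos h, ih, max_eq_right h.le]
      · rw [if_neg h, ih, max_eq_left (not_lt.mp h)]

theorem pvMStep_foldl_eq_max? (l : List Int) :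
    l.foldl pvMStep none = PySem.List.max? (l.filter (fun c => decide (c ≠ 1000))) (fun y => y) := by
  have hfun : pvMStep = fun (acc : Option Int) (c : Int) => if c ≠ 1000 then pvMRun acc c else acc := by
    funext o c
    simp [pvMStep, pvMRun]
  rw [hfun, PySem.List.foldl_ite_eq_foldl_filter]
  cases hf : l.filter (fun c => decide (c ≠ 1000)) with
  | nil => rfl
  | cons x t =>
      rw [PySem.List.max?_id_cons]
      simp only [List.foldl_cons, pvMRun]
      exact pvMRun_foldl_some t x

theorem pvFU_as_set (i : Nat) (u : List (Option Int)) (jc : Int × Int) (h : i < u.length) :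
    pvFU i u jc = u.set i (pvMStep (u.getD i none) jc.2) := by
  have hget : u.getD i none = u[i] := List.getD_eq_getElem u none h
  have hopt : u[i]?.getD (none : Option Int) = u[i] := by simp [List.getElem?_eq_getElem h]
  by_cases hc : jc.2 = 1000
  · simp [pvFU, pvMStep, hc, hopt, List.set_getElem_self h]
  · simp only [pvFU, pvMStep, if_pos (show jc.2 ≠ 1000 from hc), hget]
    cases hui : u[i] with
    | none => rfl
    | some x =>
        by_cases hx : jc.2 > x
        · simp [hx]
        · simp only [if_neg hx]
          exact (hui ▸ List.set_getElem_self h).symm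

theorem pvFU_foldl (row : List Int) (s : Int) (i : Nat) (u : List (Option Int)) (h : i < u.length) :
    (PySem.List.enumerate row s).foldl (pvFU i) u = u.set i (row.foldl pvMStep (u.getD i none)) := by
  induction row generalizing u s with
  | nil =>
      rw [PySem.List.enumerate_nil]
      simp only [List.foldl_nil]
      rw [List.getD_eq_getElem u none h, List.set_getElem_self h]
  | cons c row ih =>
      rw [PySem.List.enumerate_cons, List.foldl_cons, pvFU_as_set i u (s, c) h]
      have h' : i < (u.set i (pvMStep (u.getD i none) c)).length := by simpa using h
      rw [ih (s + 1) _ h', List.set_set]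
      congr 1
      rw [List.foldl_cons]
      congr 1
      rw [List.getD_eq_getElem _ _ (by simpa using h), List.getElem_set_self]

theorem pvFV_foldl_past (dlen : Nat) (row : List Int) (s : Int) (w : List (Option Int))
    (h : (dlen : Int) ≤ s) :
    (PySem.List.enumerate row s).foldl (pvFV dlen) w = w := by
  induction row generalizing s with
  | nil => simp [PySem.List.enumerate_nil]
  | cons c row ih =>
      rw [PySem.List.enumerate_cons, List.foldl_cons]
      have hstep : pvFV dlen w (s, c) = w := by
        simp only [pvFV]
        have hs : ¬ s < (dlen : Int) := not_lt.mpr h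
        split_ifs <;> simp_all
      rw [hstep]
      exact ih (s + 1) (by omega)

theorem pvFV_foldl (dlen : Nat) (row : List Int) (pre v : List (Option Int))
    (hlen : v.length ≤ row.length) (hd : dlen = pre.length + v.length) :
    (PySem.List.enumerate row (pre.length : Int)).foldl (pvFV dlen) (pre ++ v)
      = pre ++ List.zipWith pvMStep v row := by
  induction row generalizing pre v with
  | nil =>
      have : v = [] := List.eq_nil_of_length_eq_zero (Nat.le_zero.mp (by simpa using hlen))
      simp [this, PySem.List.enumerate_nil]
  | cons c row ih =>
      cases v with
      | nil =>
          simp only [List.zipWith_nil_left, List.append_nil]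
          exact pvFV_foldl_past dlen (c :: row) _ pre (by simp [hd])
      | cons o v' =>
          have hlt : (pre.length : Int) < (dlen : Int) := by
            simp at hd
            omega
          have hstep : pvFV dlen (pre ++ o :: v') ((pre.length : Int), c)
              = pre ++ pvMStep o c :: v' := by
            have hget : (pre ++ o :: v').getD pre.length none = o := by simp [List.getD]
            have hset : ∀ a, (pre ++ o :: v').set pre.length a = pre ++ a :: v' := by
              intro a; simp
            by_cases hc : c = 1000
            · simp [pvFV, pvMStep, hc]
            · simp only [pvFV, pvMStep, if_pos (by simpa using hc),
                if_pos hlt, Int.toNat_natCast, hget]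
              cases o with
              | none => exact hset _
              | some x =>
                  by_cases hx : c > x
                  · simp only [if_pos hx]; exact hset _
                  · simp [if_neg hx]
          rw [PySem.List.enumerate_cons, List.foldl_cons, hstep]
          have hassoc : pre ++ pvMStep o c :: v' = (pre ++ [pvMStep o c]) ++ v' := by simp
          have hslen : (pre.length : Int) + 1 = ((pre ++ [pvMStep o c]).length : Int) := by
            simp
          rw [hassoc, hslen, ih (pre ++ [pvMStep o c]) v' (by simpa using Nat.le_of_succ_le_succ (by simpa using hlen)) (by simp only [List.length_append, List.length_cons, List.length_nil] at hd ⊢; omega)]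
          simp [List.zipWith_cons_cons]

theorem pvFV_foldl0 (dlen : Nat) (row : List Int) (v : List (Option Int))
    (hlen : v.length ≤ row.length) (hd : dlen = v.length) :
    (PySem.List.enumerate row 0).foldl (pvFV dlen) v = List.zipWith pvMStep v row := by
  have h := pvFV_foldl dlen row [] v hlen (by simpa using hd)
  simpa using h

-- A's set-at-each-index loop over range n, starting from a constant list
theorem pvSetFold (n L : Nat) (h : n ≤ L) (f : Nat → Option Int) (d : Int) :
    (List.range n).foldl
      (fun (w : List Int) k => match f k with | some m => w.set k m | none => w)
      (List.replicate L d)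
    = (List.range n).map (fun k => (f k).getD d) ++ List.replicate (L - n) d := by
  induction n with
  | zero => simp
  | succ n ih =>
      rw [List.range_succ, List.foldl_append, ih (by omega), List.map_append]
      have hrep : List.replicate (L - n) d = d :: List.replicate (L - (n + 1)) d := by
        have h2 : L - n = (L - (n + 1)) + 1 := by omega
        rw [h2, List.replicate_succ]
      simp only [List.foldl_cons, List.foldl_nil]
      cases hf : f n with
      | none => simp [hrep, hf]
      | some m =>
          rw [hrep]
          simp [hf]

-- B's u-side outer loop
theorem pvBU (costs : List (List Int)) (n L : Nat) (h : n ≤ L) :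
    (List.range n).foldl
      (fun u k => (PySem.List.enumerate (costs.getD k []) 0).foldl (pvFU k) u)
      (List.replicate L none)
    = (List.range n).map (fun k => (costs.getD k []).foldl pvMStep none)
      ++ List.replicate (L - n) none := by
  induction n with
  | zero => simp
  | succ n ih =>
      rw [List.range_succ, List.foldl_append, ih (by omega), List.map_append]
      have hrep : List.replicate (L - n) (none : Option Int)
          = none :: List.replicate (L - (n + 1)) none := by
        have h2 : L - n = (L - (n + 1)) + 1 := by omega
        rw [h2, List.replicate_succ]
      simp only [List.foldl_cons, List.foldl_nil]
      have hlenS : n < (List.map (fun k => (costs.getD k []).foldl pvMStep none) (List.range n)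
          ++ List.replicate (L - n) (none : Option Int)).length := by
        simp
        omega
      rw [pvFU_foldl _ _ _ _ hlenS]
      have hget : (List.map (fun k => (costs.getD k []).foldl pvMStep none) (List.range n)
          ++ List.replicate (L - n) (none : Option Int)).getD n none = none := by
        rw [hrep]
        simp [List.getD]
      rw [hget, hrep, List.set_append]
      simp

-- B's v-side outer loop
theorem pvBV (costs : List (List Int)) (dlen n : Nat)
    (hrows : ∀ k < n, dlen ≤ (costs.getD k []).length) :
    (List.range n).foldl
      (fun v k => (PySem.List.enumerate (costs.getD k []) 0).foldl (pvFV dlen) v)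
      (List.replicate dlen (none : Option Int))
    = (List.range dlen).map (fun j =>
        ((List.range n).map (fun k => (costs.getD k []).getD j 0)).foldl pvMStep none) := by
  induction n with
  | zero => simp [List.map_const']
  | succ n ih =>
      rw [List.range_succ, List.foldl_append, ih (fun k hk => hrows k (by omega))]
      simp only [List.foldl_cons, List.foldl_nil]
      have hlenv : ((List.range dlen).map (fun j =>
          ((List.range n).map (fun k => (costs.getD k []).getD j 0)).foldl pvMStep none)).length
          = dlen := by simp
      have hle : ((List.range dlen).map (fun j =>
          ((List.range n).map (fun k => (costs.getD k []).getD j 0)).foldl pvMStep none)).length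
          ≤ (costs.getD n []).length := by
        rw [hlenv]; exact hrows n (by omega)
      rw [pvFV_foldl0 dlen (costs.getD n []) _ hle hlenv.symm]
      apply List.ext_getElem
      · rw [List.length_zipWith, hlenv, List.length_map, List.length_range]
        exact min_eq_left (hrows n (by omega))
      · intro j h1 h2
        rw [List.getElem_zipWith]
        simp only [List.getElem_map, List.getElem_range]
        have hj : j < dlen := by
          simp at h2
          exact h2
        rw [List.map_append, List.foldl_append]
        simp only [List.map_cons, List.map_nil, List.foldl_cons, List.foldl_nil]
        congr 1
        exact (List.getD_eq_getElem _ _ (by simp at h1; omega)).symm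

theorem pvInner_eq (dlen k : Nat) (row : List Int) (st : List (Option Int) × List (Option Int)) :
    (PySem.List.enumerate row 0).foldl (fun st (jc : Int × Int) =>
      if jc.2 ≠ 1000 then
        (match st.1.getD k none with
         | none => st.1.set k (some jc.2)
         | some x => if jc.2 > x then st.1.set k (some jc.2) else st.1,
         if jc.1 < (dlen : Int) then
           match st.2.getD jc.1.toNat none with
           | none => st.2.set jc.1.toNat (some jc.2)
           | some x => if jc.2 > x then st.2.set jc.1.toNat (some jc.2) else st.2
         else st.2)
      else st) st
    = ((PySem.List.enumerate row 0).foldl (pvFU k) st.1,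
       (PySem.List.enumerate row 0).foldl (pvFV dlen) st.2) := by
  have hfun : (fun (st : List (Option Int) × List (Option Int)) (jc : Int × Int) =>
      if jc.2 ≠ 1000 then
        (match st.1.getD k none with
         | none => st.1.set k (some jc.2)
         | some x => if jc.2 > x then st.1.set k (some jc.2) else st.1,
         if jc.1 < (dlen : Int) then
           match st.2.getD jc.1.toNat none with
           | none => st.2.set jc.1.toNat (some jc.2)
           | some x => if jc.2 > x then st.2.set jc.1.toNat (some jc.2) else st.2
         else st.2)
      else st)
      = fun st jc => (pvFU k st.1 jc, pvFV dlen st.2 jc) := by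
    funext st jc
    by_cases hc : jc.2 = 1000
    · simp [pvFU, pvFV, hc]
    · simp [pvFU, pvFV, hc]
  rw [hfun, PySem.List.foldl_prod_mk]

theorem find_russell_costs_spec : Claim_equal_find_russell_costs := by
  unfold Claim_equal_find_russell_costs
  intro supply demand costs _ hpre
  obtain ⟨hlen, hrows⟩ := hpre
  unfold Spec_find_russell_costs
  have hrow : ∀ k, k < supply.length → demand.length ≤ (costs.getD k []).length := by
    intro k hk
    have hk' : k < costs.length := lt_of_lt_of_le hk hlen
    apply hrows
    rw [List.getD_eq_getElem _ _ hk']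
    have h1 : k < (costs.take supply.length).length := by
      simp
      omega
    have h2 : (costs.take supply.length)[k] = costs[k] := List.getElem_take
    rw [← h2]
    exact List.getElem_mem h1
  simp only [find_russell_costs, find_russell_costs_alt, PySem.List.pyRange_zero_natCast,
    List.foldl_map, List.map_map, PySem.List.pyGetD_natCast, Int.toNat_natCast]
  simp only [pvInner_eq]
  rw [PySem.List.foldl_prod_mk
      (f := fun u (k : Nat) => (PySem.List.enumerate (costs.getD k []) 0).foldl (pvFU k) u)
      (g := fun v (k : Nat) => (PySem.List.enumerate (costs.getD k []) 0).foldl (pvFV demand.length) v)]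
  rw [pvBU costs supply.length supply.length le_rfl, pvBV costs demand.length supply.length hrow]
  rw [pvSetFold supply.length supply.length le_rfl, pvSetFold demand.length demand.length le_rfl]
  simp [List.map_map, Function.comp, pvMStep_foldl_eq_max?]
  intro a ha
  simp [Function.comp_def, PySem.List.pyGetD_natCast, List.getD]
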